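-- pv_equiv track=rewrite | github.com/azazo1/campus-bot | tools/classtable/generate_latex_table.py | time_to_slot
-- ===== SOURCE A (Python) =====
-- from typing import Optional, List
--
-- time_slots = [
--     ((8, 0), (8, 45)), ((8, 50), (9, 35)), ((9, 50), (10, 35)), ((10, 40), (11, 25)), ((11, 30), (12, 15)),  # 上午
--     ((13, 0), (13, 45)), ((13, 50), (14, 35)), ((14, 50), (15, 35)), ((15, 40), (16, 25)), ((16, 30), (17, 15)),  # 下午
--     ((18, 0), (18, 45)), ((18, 50), (19, 35)), ((19, 40), (20, 25))  # 晚上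
-- ]
--
-- def time_to_slot(hour: int, minute: int) -> Optional[int]:
--     """
--     给定一个小时和分钟, 返回对应的节次编号.
--     Tips: 遍历 time_slots, 看这个时间落在哪个范围内的开始 - 结束之间.
--     这里假设 start_time 就落在对应节次的开始时间或稍后一点点.
--
--     :param hour: 小时
--     :param minute: 分钟
--     :return: 将小时和分钟映射到节次编号 (1 开始计数)
--     """
--     for i, ((sh, sm), (eh, em)) in enumerate(time_slots, start=1):
--         start_time = sh * 60 + sm
--         end_time = eh * 60 + em
--         current = hour * 60 + minute
--         # 这里假设当前时间点 >= 节次的开始时间 且 < 节次的结束时间，即为该节次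
--         if start_time <= current <= end_time:
--             return i
--     return None
-- ===== SOURCE B (Python) =====
-- time_slots = [
--     ((8, 0), (8, 45)), ((8, 50), (9, 35)), ((9, 50), (10, 35)), ((10, 40), (11, 25)), ((11, 30), (12, 15)),
--     ((13, 0), (13, 45)), ((13, 50), (14, 35)), ((14, 50), (15, 35)), ((15, 40), (16, 25)), ((16, 30), (17, 15)),
--     ((18, 0), (18, 45)), ((18, 50), (19, 35)), ((19, 40), (20, 25))
-- ]
--
-- # Precomputed once at import: minute-of-day -> 1-based slot index.
-- slot_of_minute = {}
-- for i, ((sh, sm), (eh, em)) in enumerate(time_slots, start=1):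
--     for c in range(sh * 60 + sm, eh * 60 + em + 1):
--         slot_of_minute[c] = i
--
-- def time_to_slot(hour, minute):
--     return slot_of_minute.get(hour * 60 + minute)
-- ===== Notes on version B (the rewrite author's own statement) =====
-- stated objective: idiomatic
-- what changed: Replaces the per-call linear scan over the 13 time slots by a table precomputed once at import (minute-of-day -> slot index), so each call is a single dict lookup.
import Mathlib
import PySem

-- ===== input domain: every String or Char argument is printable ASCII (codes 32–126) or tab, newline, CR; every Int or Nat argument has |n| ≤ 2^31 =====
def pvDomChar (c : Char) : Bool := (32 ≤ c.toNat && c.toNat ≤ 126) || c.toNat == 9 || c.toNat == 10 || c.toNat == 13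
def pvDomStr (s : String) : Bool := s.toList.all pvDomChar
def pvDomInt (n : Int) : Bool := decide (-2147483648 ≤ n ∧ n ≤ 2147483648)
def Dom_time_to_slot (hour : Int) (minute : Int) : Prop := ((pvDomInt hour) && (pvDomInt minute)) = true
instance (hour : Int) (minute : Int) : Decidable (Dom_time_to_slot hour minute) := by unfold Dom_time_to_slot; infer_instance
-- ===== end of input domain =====

-- B replaces A's per-call linear scan of the 13 slots by a table (minute-of-day -> slot) built once, then a single dict lookup.


-- ===== PORT A =====
def timeSlots : List ((Int × Int) × (Int × Int)) :=
  [((8, 0), (8, 45)), ((8, 50), (9, 35)), ((9, 50), (10, 35)), ((10, 40), (11, 25)), ((11, 30), (12, 15)),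
   ((13, 0), (13, 45)), ((13, 50), (14, 35)), ((14, 50), (15, 35)), ((15, 40), (16, 25)), ((16, 30), (17, 15)),
   ((18, 0), (18, 45)), ((18, 50), (19, 35)), ((19, 40), (20, 25))]

-- the for-loop with early return over enumerate(time_slots, start=1)
def tts_scan (hour : Int) (minute : Int) : List (Int × ((Int × Int) × (Int × Int))) → Option Int
  | [] => none
  | (i, ((sh, sm), (eh, em))) :: rest =>
      let start_time := sh * 60 + sm
      let end_time := eh * 60 + em
      let current := hour * 60 + minute
      if start_time ≤ current ∧ current ≤ end_time then some i else tts_scan hour minute rest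

def time_to_slot (hour : Int) (minute : Int) : Option Int :=
  tts_scan hour minute (PySem.List.enumerate timeSlots 1)

-- ===== PORT B =====
-- module-level table: every minute-of-day in a slot's inclusive range maps to its 1-based index
def slot_of_minute : PySem.Dict Int Int :=
  (PySem.List.enumerate timeSlots 1).foldl
    (fun d p =>
      match p with
      | (i, ((sh, sm), (eh, em))) =>
          (PySem.List.pyRange (sh * 60 + sm) (eh * 60 + em + 1) 1).foldl
            (fun d c => d.insert c i) d)
    PySem.Dict.empty

def time_to_slot_alt (hour : Int) (minute : Int) : Option Int :=
  slot_of_minute.get? (hour * 60 + minute)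

-- ===== PRECONDITION & SPEC =====
def Spec_time_to_slot (hour : Int) (minute : Int) (out : Option Int) : Prop := out = time_to_slot_alt hour minute
instance (hour : Int) (minute : Int) (out : Option Int) : Decidable (Spec_time_to_slot hour minute out) := by unfold Spec_time_to_slot; infer_instance

-- ===== CLAIM (what is proved, stated in full; the proofs are below) =====
def Claim_equal_time_to_slot : Prop := ∀ (hour : Int) (minute : Int), Dom_time_to_slot hour minute → Spec_time_to_slot hour minute (time_to_slot hour minute)

-- ===== LEMMAS AND PROOFS =====

-- one step of the scan, for rewriting
lemma tts_scan_cons (h m i sh sm eh em : Int) (rest : List (Int × ((Int × Int) × (Int × Int)))) :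
    tts_scan h m ((i, ((sh, sm), (eh, em))) :: rest)
      = if sh * 60 + sm ≤ h * 60 + m ∧ h * 60 + m ≤ eh * 60 + em then some i
        else tts_scan h m rest := rfl

-- the scan returns none when no slot's interval contains the current minute
lemma tts_scan_none (h m : Int) (l : List (Int × ((Int × Int) × (Int × Int))))
    (H : ∀ p ∈ l, ¬(p.2.1.1 * 60 + p.2.1.2 ≤ h * 60 + m ∧ h * 60 + m ≤ p.2.2.1 * 60 + p.2.2.2)) :
    tts_scan h m l = none := by
  induction l with
  | nil => rfl
  | cons p rest ih =>
      obtain ⟨i, ⟨sh, sm⟩, eh, em⟩ := p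
      rw [tts_scan_cons, if_neg (H _ (List.mem_cons_self ..))]
      exact ih fun q hq => H q (List.mem_cons_of_mem _ hq)

-- filling a dict along pyRange a (a+n) 1 with a constant value i, seen through get?
lemma range_fill_aux (n : Nat) : ∀ (a : Int) (d : PySem.Dict Int Int) (i c : Int),
    ((PySem.List.pyRange a (a + (n : Int)) 1).foldl (fun d c => d.insert c i) d).get? c
      = if a ≤ c ∧ c < a + (n : Int) then some i else d.get? c := by
  induction n with
  | zero =>
      intro a d i c
      rw [PySem.List.pyRange_one_eq_nil (by omega)]
      simp only [List.foldl_nil]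
      rw [if_neg (by omega)]
  | succ n ih =>
      intro a d i c
      have hb : a + ((n + 1 : Nat) : Int) = (a + 1) + (n : Int) := by push_cast; ring
      rw [hb, PySem.List.pyRange_one_cons (by omega), List.foldl_cons, ih (a + 1),
        PySem.Dict.get?_insert]
      split_ifs <;> first | rfl | omega

-- same, for arbitrary bounds a b
lemma range_fill (a b : Int) (d : PySem.Dict Int Int) (i c : Int) :
    ((PySem.List.pyRange a b 1).foldl (fun d c => d.insert c i) d).get? c
      = if a ≤ c ∧ c < b then some i else d.get? c := by
  by_cases h : b ≤ a
  · rw [PySem.List.pyRange_one_eq_nil h]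
    simp only [List.foldl_nil]
    rw [if_neg (by omega)]
  · have hb : b = a + ((b - a).toNat : Int) := by omega
    rw [hb, range_fill_aux]

-- the dict built over a list of slots whose intervals come in strictly increasing, disjoint
-- order answers exactly what the first-match scan over that list answers
lemma build_get (hr mi : Int) :
    ∀ (l : List (Int × ((Int × Int) × (Int × Int)))) (d : PySem.Dict Int Int),
    l.Pairwise (fun p q => p.2.2.1 * 60 + p.2.2.2 < q.2.1.1 * 60 + q.2.1.2) →
    (l.foldl
      (fun d p =>
        match p with
        | (i, ((sh, sm), (eh, em))) =>
            (PySem.List.pyRange (sh * 60 + sm) (eh * 60 + em + 1) 1).foldl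
              (fun d c => d.insert c i) d)
      d).get? (hr * 60 + mi)
      = (tts_scan hr mi l).elim (d.get? (hr * 60 + mi)) some := by
  intro l
  induction l with
  | nil => intro d _; rfl
  | cons p rest ih =>
      intro d hpw
      obtain ⟨i, ⟨sh, sm⟩, eh, em⟩ := p
      rw [List.pairwise_cons] at hpw
      obtain ⟨hhead, htail⟩ := hpw
      simp only [List.foldl_cons]
      rw [ih _ htail, tts_scan_cons]
      by_cases hm : sh * 60 + sm ≤ hr * 60 + mi ∧ hr * 60 + mi ≤ eh * 60 + em
      · have hrest : tts_scan hr mi rest = none := by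
          refine tts_scan_none hr mi rest fun q hq => ?_
          have h2 := hhead q hq
          dsimp only at h2
          omega
        rw [hrest, if_pos hm]
        simp only [Option.elim]
        rw [range_fill, if_pos (by omega)]
      · rw [if_neg hm]
        cases hs : tts_scan hr mi rest with
        | none =>
            simp only [Option.elim]
            rw [range_fill, if_neg (by omega)]
        | some j => simp only [Option.elim]

-- the 13 concrete intervals are strictly increasing (hence pairwise disjoint)
lemma timeSlots_sorted :
    (PySem.List.enumerate timeSlots 1).Pairwise
      (fun p q => p.2.2.1 * 60 + p.2.2.2 < q.2.1.1 * 60 + q.2.1.2) := by decide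

-- ===== VERDICT (by name: the statement is the Claim_ definition above) =====
theorem time_to_slot_spec : Claim_equal_time_to_slot := by
  intro hour minute _
  unfold Spec_time_to_slot time_to_slot time_to_slot_alt slot_of_minute
  rw [build_get hour minute _ PySem.Dict.empty timeSlots_sorted]
  cases hs : tts_scan hour minute (PySem.List.enumerate timeSlots 1) with
  | none => simp only [Option.elim, PySem.Dict.get?_empty]
  | some j => rfl
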